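-- pv_equiv track=rewrite | github.com/mshafqats/HackerEarth | Basic Programming/Implementation/Basics of Implementation/Greatest String.py | lexicographically_greatest_string
-- ===== SOURCE A (Python) =====
-- def lexicographically_greatest_string(s, q):
--     vowels = 'aeiou'
--     s = list(s)
--     for i in range(len(s)):
--         if s[i] in vowels and q > 0:
--             s[i] = chr(ord(s[i]) + 1)
--             q -= 1
--     return ''.join(s)
-- ===== SOURCE B (Python) =====
-- def lexicographically_greatest_string(s, q):
--     pos = [i for i, c in enumerate(s) if c in 'aeiou']
--     chosen = set(pos[:max(q, 0)])
--     return ''.join(chr(ord(c) + 1) if i in chosen else c for i, c in enumerate(s))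
-- ===== Notes on version B (the rewrite author's own statement) =====
-- stated objective: alternative
-- what changed: Replaces the single interleaved budget-decrementing mutation loop with a plan-then-render decomposition: collect all vowel indices, select the first max(q,0) of them as a set, then rebuild the string in one comprehension bumping exactly the selected positions.
import Mathlib
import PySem

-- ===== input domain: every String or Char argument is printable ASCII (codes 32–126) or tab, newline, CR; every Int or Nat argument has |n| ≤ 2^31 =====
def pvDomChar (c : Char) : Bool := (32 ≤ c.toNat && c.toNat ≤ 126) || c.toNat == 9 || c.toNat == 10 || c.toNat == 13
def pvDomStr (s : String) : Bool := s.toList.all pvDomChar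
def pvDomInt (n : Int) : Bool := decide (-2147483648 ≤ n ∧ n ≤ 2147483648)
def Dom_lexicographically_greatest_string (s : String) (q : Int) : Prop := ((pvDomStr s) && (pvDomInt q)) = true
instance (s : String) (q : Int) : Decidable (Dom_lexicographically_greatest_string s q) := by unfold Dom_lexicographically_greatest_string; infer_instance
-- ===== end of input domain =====

set_option maxRecDepth 4000


-- B rebuilds the string from the precomputed set of the first max(q,0) vowel positions
-- instead of A's interleaved budget-decrementing pass; same return value (alternative decomposition).

-- ===== PORT A =====
-- the for-loop over range(len(s)): each step reads/updates only position i and the budget q,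
-- so it is transcribed as the structural recursion over the characters carrying q.
def pvLoopA : List Char → Int → List Char
  | [], _ => []
  | c :: rest, q =>
    if ("aeiou".toList.contains c && decide (q > 0)) then
      Char.ofNat (c.toNat + 1) :: pvLoopA rest (q - 1)
    else
      c :: pvLoopA rest q

def lexicographically_greatest_string (s : String) (q : Int) : String :=
  String.ofList (pvLoopA s.toList q)

-- ===== PORT B =====
def lexicographically_greatest_string_alt (s : String) (q : Int) : String :=
  let pos : List Int :=
    ((PySem.List.enumerate s.toList 0).filter (fun p => "aeiou".toList.contains p.2)).map Prod.fst
  let chosen : PySem.Set Int := PySem.Set.ofList (PySem.List.slice pos none (some (max q 0)))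
  String.ofList ((PySem.List.enumerate s.toList 0).map
    (fun p => if PySem.Set.contains chosen p.1 then Char.ofNat (p.2.toNat + 1) else p.2))

-- ===== PRECONDITION & SPEC =====
def Spec_lexicographically_greatest_string (s : String) (q : Int) (out : String) : Prop := out = lexicographically_greatest_string_alt s q
instance (s : String) (q : Int) (out : String) : Decidable (Spec_lexicographically_greatest_string s q out) := by unfold Spec_lexicographically_greatest_string; infer_instance

-- ===== CLAIM (what is proved, stated in full; the proofs are below) =====
def Claim_equal_lexicographically_greatest_string : Prop := ∀ (s : String) (q : Int), Dom_lexicographically_greatest_string s q → Spec_lexicographically_greatest_string s q (lexicographically_greatest_string s q)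

-- ===== LEMMAS AND PROOFS =====

-- vowel positions of cs when indexing starts at k (B's `pos`, start generalized)
def pvPos (k : Int) (cs : List Char) : List Int :=
  ((PySem.List.enumerate cs k).filter (fun p => "aeiou".toList.contains p.2)).map Prod.fst

-- A's loop with the budget already clamped to a Nat
def pvLoopN : List Char → Nat → List Char
  | [], _ => []
  | c :: rest, n =>
    if ("aeiou".toList.contains c && decide (n ≠ 0)) then
      Char.ofNat (c.toNat + 1) :: pvLoopN rest (n - 1)
    else
      c :: pvLoopN rest n

lemma pvLoopA_eq_loopN (cs : List Char) (q : Int) : pvLoopA cs q = pvLoopN cs q.toNat := by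
  induction cs generalizing q with
  | nil => rfl
  | cons c rest ih =>
    cases hv : "aeiou".toList.contains c with
    | false => simp only [pvLoopA, pvLoopN, hv, Bool.false_and, Bool.false_eq_true, if_false, ih]
    | true =>
      by_cases hq : q > 0
      · have h1 : (q.toNat ≠ 0) = True := by simp; omega
        have h2 : (q - 1).toNat = q.toNat - 1 := by omega
        simp only [pvLoopA, pvLoopN, hv, Bool.true_and, hq, h1, decide_true, if_true, h2, ih]
      · have h1 : (q.toNat ≠ 0) = False := by simp; omega
        simp only [pvLoopA, pvLoopN, hv, Bool.true_and, hq, h1, decide_false,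
          Bool.false_eq_true, if_false, ih]

lemma pvLoopN_zero (cs : List Char) : pvLoopN cs 0 = cs := by
  induction cs with
  | nil => rfl
  | cons c rest ih => simp [pvLoopN, ih]

lemma pvPos_cons (k : Int) (c : Char) (rest : List Char) :
    pvPos k (c :: rest) =
      if "aeiou".toList.contains c then k :: pvPos (k + 1) rest else pvPos (k + 1) rest := by
  unfold pvPos
  rw [PySem.List.enumerate_cons, List.filter_cons]
  cases hv : "aeiou".toList.contains c with
  | false => rfl
  | true => rfl

lemma pvPos_ge (k : Int) (cs : List Char) : ∀ x ∈ pvPos k cs, k ≤ x := by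
  intro x hx
  simp only [pvPos, List.mem_map, List.mem_filter] at hx
  obtain ⟨p, ⟨hp, -⟩, rfl⟩ := hx
  rw [PySem.List.mem_enumerate_iff] at hp
  obtain ⟨j, hj, rfl⟩ := hp
  omega

-- the heart: rendering from the first n vowel positions = the budget-carrying loop
lemma pvMain (cs : List Char) (k : Int) (n : Nat) :
    (PySem.List.enumerate cs k).map
      (fun p => if ((pvPos k cs).take n).contains p.1 then Char.ofNat (p.2.toNat + 1) else p.2)
      = pvLoopN cs n := by
  induction cs generalizing k n with
  | nil => rfl
  | cons c rest ih =>
    rw [PySem.List.enumerate_cons, List.map_cons]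
    have htail : ∀ (l : List Int), (∀ x ∈ l, x ≠ k) →
        (PySem.List.enumerate rest (k + 1)).map
          (fun p => if ((k :: l) : List Int).contains p.1 then Char.ofNat (p.2.toNat + 1) else p.2)
        = (PySem.List.enumerate rest (k + 1)).map
          (fun p => if l.contains p.1 then Char.ofNat (p.2.toNat + 1) else p.2) := by
      intro l _
      apply List.map_congr_left
      intro p hp
      rw [PySem.List.mem_enumerate_iff] at hp
      obtain ⟨j, hj, rfl⟩ := hp
      have hne : (k + 1 + (j : Int)) ≠ k := by omega
      simp [hne]
    cases hv : "aeiou".toList.contains c with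
    | true =>
      rw [pvPos_cons]
      simp only [hv, if_true]
      cases n with
      | zero =>
        have h0 : ∀ x : Int, (List.take 0 (k :: pvPos (k + 1) rest)).contains x = false :=
          fun _ => rfl
        simp only [h0, Bool.false_eq_true, if_false]
        rw [PySem.List.map_snd_enumerate, pvLoopN, pvLoopN_zero]
        simp
      | succ m =>
        rw [List.take_succ_cons]
        have hhead : ((k :: (pvPos (k + 1) rest).take m).contains k) = true := by
          simp
        simp only [hhead, if_true]
        rw [htail ((pvPos (k + 1) rest).take m)
            (fun x hx => by have := pvPos_ge (k + 1) rest x (List.mem_of_mem_take hx); omega)]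
        rw [ih (k + 1) m]
        simp only [pvLoopN, hv, Bool.true_and, Nat.add_sub_cancel]
        simp
    | false =>
      rw [pvPos_cons]
      simp only [hv, Bool.false_eq_true, if_false]
      have hhead : (((pvPos (k + 1) rest).take n).contains k) = false := by
        by_contra h
        have hk : k ∈ (pvPos (k + 1) rest).take n := by
          have := Bool.of_not_eq_false h
          simpa using this
        have := pvPos_ge (k + 1) rest k (List.mem_of_mem_take hk)
        omega
      simp only [hhead, Bool.false_eq_true, if_false]
      rw [ih (k + 1) n]
      simp only [pvLoopN, hv, Bool.false_and, Bool.false_eq_true, if_false]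

lemma pvSetContains (l : List Int) (x : Int) :
    PySem.Set.contains (PySem.Set.ofList l) x = l.contains x := by
  by_cases h : x ∈ l
  · have h1 : PySem.Set.contains (PySem.Set.ofList l) x = true := by
      rw [PySem.Set.contains_iff, PySem.Set.mem_ofList]; exact h
    have h2 : l.contains x = true := by simpa using h
    rw [h1, h2]
  · have h1 : ¬ PySem.Set.contains (PySem.Set.ofList l) x = true := by
      rw [PySem.Set.contains_iff, PySem.Set.mem_ofList]; exact h
    have h2 : ¬ l.contains x = true := by simpa using h
    simp only [Bool.not_eq_true] at h1 h2
    rw [h1, h2]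

lemma pvMainEq (s : String) (q : Int) :
    lexicographically_greatest_string_alt s q = lexicographically_greatest_string s q := by
  unfold lexicographically_greatest_string_alt lexicographically_greatest_string
  dsimp only
  have hmax : (max q 0) = ((q.toNat : Nat) : Int) := by omega
  rw [hmax, PySem.List.slice_to_natCast]
  rw [pvLoopA_eq_loopN]
  rw [← pvMain s.toList 0 q.toNat]
  congr 1
  apply List.map_congr_left
  intro p _
  rw [pvSetContains]
  rfl

-- ===== VERDICT (by name: the statement is the Claim_ definition above) =====
theorem lexicographically_greatest_string_spec : Claim_equal_lexicographically_greatest_string := by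
  intro s q _
  unfold Spec_lexicographically_greatest_string
  exact (pvMainEq s q).symm
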